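-- pv_equiv track=rewrite | github.com/viegasdom/aoc | 2015/day_1/nav.py | first_basement_position
-- ===== SOURCE A (Python) =====
-- def first_basement_position(path: str) -> int:
--     floor = 0
--     position = 1
--     for index, direction in enumerate(path):
--         if direction == "(":
--             floor += 1
--         elif direction == ")":
--             floor -= 1
--
--         if floor < 0:
--             position = index + 1
--             break
--
--     return position
-- ===== SOURCE B (Python) =====
-- def _solve(chars, floor):
--     """Divide and conquer: return (first 0-based index inside chars where the
--     running floor drops below zero when starting at `floor`, or None; total delta)."""
--     if len(chars) == 0:
--         return (None, 0)
--     if len(chars) == 1: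
--         d = 1 if chars[0] == "(" else -1 if chars[0] == ")" else 0
--         return ((0 if floor + d < 0 else None), d)
--     mid = len(chars) // 2
--     fi_l, d_l = _solve(chars[:mid], floor)
--     fi_r, d_r = _solve(chars[mid:], floor + d_l)
--     if fi_l is not None:
--         fi = fi_l
--     elif fi_r is not None:
--         fi = mid + fi_r
--     else:
--         fi = None
--     return (fi, d_l + d_r)
--
--
-- def first_basement_position(path: str) -> int:
--     fi, _ = _solve(path, 0)
--     return fi + 1 if fi is not None else 1
-- ===== Notes on version B (the rewrite author's own statement) =====
-- stated objective: alternative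
-- what changed: Replaces A's fused left-to-right loop with early break by a divide-and-conquer that recursively summarizes each half as (first-basement index, total delta) and combines the summaries.
import Mathlib
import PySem

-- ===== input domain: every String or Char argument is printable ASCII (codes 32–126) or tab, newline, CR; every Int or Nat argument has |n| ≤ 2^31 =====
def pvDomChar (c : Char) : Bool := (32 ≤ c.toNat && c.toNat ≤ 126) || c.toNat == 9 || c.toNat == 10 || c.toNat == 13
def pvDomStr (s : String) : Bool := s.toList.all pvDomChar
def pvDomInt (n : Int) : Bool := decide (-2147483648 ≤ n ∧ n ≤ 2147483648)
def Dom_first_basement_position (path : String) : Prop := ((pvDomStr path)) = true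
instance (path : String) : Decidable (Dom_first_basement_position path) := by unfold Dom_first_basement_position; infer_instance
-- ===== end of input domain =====

-- B replaces A's left-to-right loop with a divide-and-conquer over halves of the string; alternative structure, same result.

-- ===== PORT A =====
-- A's for-loop with early break: carries floor and the running index.
def fbpLoopA : List Char → Int → Nat → Int
  | [], _, _ => 1
  | c :: rest, floor, idx =>
      let f := if c = '(' then floor + 1 else if c = ')' then floor - 1 else floor
      if f < 0 then ((idx : Int) + 1) else fbpLoopA rest f (idx + 1)

def first_basement_position (path : String) : Int :=
  fbpLoopA path.toList 0 0

-- ===== PORT B =====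
def fbpDelta (c : Char) : Int := if c = '(' then 1 else if c = ')' then -1 else 0

-- B's _solve: summarize a segment, starting at `floor`, as
-- (first 0-based index where the running floor goes below 0, total delta).
def fbpSolve : List Char → Int → Option Nat × Int
  | [], _ => (none, 0)
  | [c], floor =>
      let d := fbpDelta c
      ((if floor + d < 0 then some 0 else none), d)
  | c1 :: c2 :: rest, floor =>
      let cs := c1 :: c2 :: rest
      let mid := cs.length / 2
      let (fiL, dL) := fbpSolve (cs.take mid) floor
      let (fiR, dR) := fbpSolve (cs.drop mid) (floor + dL)
      let fi := match fiL with
        | some i => some i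
        | none =>
          match fiR with
          | some j => some (mid + j)
          | none => none
      (fi, dL + dR)
termination_by cs _ => cs.length
decreasing_by
  · simp; omega
  · simp; omega

def first_basement_position_alt (path : String) : Int :=
  match (fbpSolve path.toList 0).1 with
  | some i => (i : Int) + 1
  | none => 1

-- ===== PRECONDITION & SPEC =====
def Spec_first_basement_position (path : String) (out : Int) : Prop := out = first_basement_position_alt path
instance (path : String) (out : Int) : Decidable (Spec_first_basement_position path out) := by unfold Spec_first_basement_position; infer_instance

-- ===== CLAIM (what is proved, stated in full; the proofs are below) =====
def Claim_equal_first_basement_position : Prop := ∀ (path : String), Dom_first_basement_position path → Spec_first_basement_position path (first_basement_position path)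

-- ===== LEMMAS AND PROOFS =====

-- Reference left-to-right characterisation: first index where the floor goes below 0.
def fbpFirstNeg : List Char → Int → Option Nat
  | [], _ => none
  | c :: rest, floor =>
      if floor + fbpDelta c < 0 then some 0
      else (fbpFirstNeg rest (floor + fbpDelta c)).map (· + 1)

theorem fbpFirstNeg_append (l r : List Char) (floor : Int) :
    fbpFirstNeg (l ++ r) floor =
      match fbpFirstNeg l floor with
      | some i => some i
      | none => (fbpFirstNeg r (floor + (l.map fbpDelta).sum)).map (· + l.length) := by
  induction l generalizing floor with
  | nil => simp [fbpFirstNeg]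
  | cons c rest ih =>
      simp only [List.cons_append, fbpFirstNeg, List.map_cons, List.sum_cons]
      by_cases h : floor + fbpDelta c < 0
      · simp [h]
      · simp only [if_neg h, ih]
        cases fbpFirstNeg rest (floor + fbpDelta c) with
        | some i => simp
        | none =>
            simp only [Option.map_map, List.length_cons]
            have : floor + (fbpDelta c + (rest.map fbpDelta).sum)
                = floor + fbpDelta c + (rest.map fbpDelta).sum := by ring
            rw [this]
            cases fbpFirstNeg r (floor + fbpDelta c + (rest.map fbpDelta).sum) with
            | none => simp
            | some j => simp

theorem fbpSolve_eq (cs : List Char) (floor : Int) :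
    fbpSolve cs floor = (fbpFirstNeg cs floor, (cs.map fbpDelta).sum) := by
  induction cs, floor using fbpSolve.induct with
  | case1 floor => simp [fbpSolve, fbpFirstNeg]
  | case2 c floor =>
      simp only [fbpSolve, fbpFirstNeg]
      by_cases h : floor + fbpDelta c < 0 <;> simp [h]
  | case3 c1 c2 rest floor cs mid fiL dL heq1 fiR dR heq2 ih1 ih2 =>
      simp only [mid, cs] at ih1 ih2 heq1 heq2
      rw [ih1] at heq1
      injection heq1 with h1 h2
      subst h1 h2
      rw [fbpSolve, ih1]
      simp only [ih2]
      have hsplit := List.take_append_drop ((c1 :: c2 :: rest).length / 2) (c1 :: c2 :: rest)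
      have hlen : (((c1 :: c2 :: rest).take ((c1 :: c2 :: rest).length / 2)).length)
          = (c1 :: c2 :: rest).length / 2 := by
        simp; omega
      simp only [Prod.mk.injEq]
      constructor
      · conv_rhs => rw [← hsplit]
        rw [fbpFirstNeg_append, hlen]
        cases fbpFirstNeg ((c1 :: c2 :: rest).take ((c1 :: c2 :: rest).length / 2)) floor with
        | some i => simp
        | none =>
            simp only
            cases fbpFirstNeg ((c1 :: c2 :: rest).drop ((c1 :: c2 :: rest).length / 2))
                (floor + (((c1 :: c2 :: rest).take ((c1 :: c2 :: rest).length / 2)).map fbpDelta).sum) with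
            | none => simp
            | some j => simp [Nat.add_comm]
      · conv_rhs => rw [← hsplit]
        simp

theorem fbpLoopA_eq (cs : List Char) (floor : Int) (idx : Nat) :
    fbpLoopA cs floor idx =
      match fbpFirstNeg cs floor with
      | some i => ((idx : Int) + (i : Int) + 1)
      | none => 1 := by
  induction cs generalizing floor idx with
  | nil => simp [fbpLoopA, fbpFirstNeg]
  | cons c rest ih =>
      simp only [fbpLoopA, fbpFirstNeg]
      have hd : (if c = '(' then floor + 1 else if c = ')' then floor - 1 else floor)
          = floor + fbpDelta c := by
        unfold fbpDelta; split_ifs <;> omega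
      rw [hd]
      by_cases h : floor + fbpDelta c < 0
      · simp [h]
      · simp only [if_neg h, ih]
        cases fbpFirstNeg rest (floor + fbpDelta c) with
        | none => simp
        | some i => push_cast; simp; ring

-- ===== VERDICT (by name: the statement is the Claim_ definition above) =====
theorem first_basement_position_spec : Claim_equal_first_basement_position := by
  intro path _
  unfold Spec_first_basement_position first_basement_position first_basement_position_alt
  rw [fbpLoopA_eq, fbpSolve_eq]
  cases fbpFirstNeg path.toList 0 <;> simp
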